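-- pv_equiv track=rewrite | github.com/henrynoowah/Algorithms | baekjoon/python/bj_2579.py | solution
-- ===== SOURCE A (Python) =====
-- def solution(steps):
--     if len(steps) <= 2:
--         return (sum(steps))
--     else:
--         for i in range(len(steps)-1, len(steps)-4, -1):
--             answer = steps[i] #20
--             steps[i-2] = answer + max(steps[i-1], steps[i-2])
--             return solution(steps[:i-1])
-- ===== SOURCE B (Python) =====
-- def solution(steps):
--     s = list(steps)
--     n = len(s)
--     while n >= 3:
--         s[n - 3] = s[n - 1] + max(s[n - 2], s[n - 3])
--         n -= 2
--     return sum(s[:n])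
-- ===== Notes on version B (the rewrite author's own statement) =====
-- stated objective: faster
-- what changed: Replaced A's recursion that copies a 2-shorter slice of the list at every step with a single backward while-loop applying the same update rule in place on one copy, then summing the surviving prefix.
import Mathlib
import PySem

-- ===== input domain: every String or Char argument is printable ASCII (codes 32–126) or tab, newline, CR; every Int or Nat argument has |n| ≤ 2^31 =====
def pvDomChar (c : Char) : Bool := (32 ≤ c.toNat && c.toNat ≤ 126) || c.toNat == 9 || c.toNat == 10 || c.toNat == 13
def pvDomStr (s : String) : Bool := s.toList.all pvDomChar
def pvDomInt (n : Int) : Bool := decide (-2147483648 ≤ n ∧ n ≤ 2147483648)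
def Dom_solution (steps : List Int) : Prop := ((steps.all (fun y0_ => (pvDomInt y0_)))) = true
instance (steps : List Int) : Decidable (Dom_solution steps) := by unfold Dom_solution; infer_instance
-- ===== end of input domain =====

-- B replaces A's O(n^2) recursion-with-slice-copies by one in-place backward loop (O(n));
-- equivalence is about the RETURN value only: Python A mutates its argument (steps[len-3]), B does not.

-- ===== PORT A =====
-- A: if len ≤ 2 return sum; else the for-loop body runs once with i = len-1 and returns.
def solution (steps : List Int) : Int :=
  if steps.length ≤ 2 then steps.sum
  else
    let i : Int := (steps.length : Int) - 1
    let answer := PySem.List.pyGetD steps i 0      -- steps[i], always in range (len ≥ 3)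
    let steps' := PySem.List.pySetD steps (i - 2)
      (answer + max (PySem.List.pyGetD steps (i - 1) 0) (PySem.List.pyGetD steps (i - 2) 0))
    solution (PySem.List.slice steps' none (some (i - 1)))
termination_by steps.length
decreasing_by
  have : (steps.length : Int) - 1 - 1 = ((steps.length - 2 : Nat) : Int) := by omega
  simp only [this, PySem.List.slice_to_natCast, List.length_take, PySem.List.length_pySetD]
  omega

-- ===== PORT B =====
-- B's while loop: s[n-3] = s[n-1] + max(s[n-2], s[n-3]); n -= 2.  Indices always in range (3 ≤ n ≤ len s).
def solLoop (s : List Int) (n : Nat) : List Int × Nat :=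
  if 3 ≤ n then
    solLoop (s.set (n - 3) (s.getD (n - 1) 0 + max (s.getD (n - 2) 0) (s.getD (n - 3) 0))) (n - 2)
  else (s, n)
termination_by n

def solution_alt (steps : List Int) : Int :=
  let p := solLoop steps steps.length
  (p.1.take p.2).sum

-- ===== PRECONDITION & SPEC =====
def Spec_solution (steps : List Int) (out : Int) : Prop := out = solution_alt steps
instance (steps : List Int) (out : Int) : Decidable (Spec_solution steps out) := by unfold Spec_solution; infer_instance

-- ===== CLAIM (what is proved, stated in full; the proofs are below) =====
def Claim_equal_solution : Prop := ∀ (steps : List Int), Dom_solution steps → Spec_solution steps (solution steps)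

-- ===== LEMMAS AND PROOFS =====

theorem getD_take_of_lt (s : List Int) (n k : Nat) (h : k < n) (d : Int) :
    (s.take n).getD k d = s.getD k d := by
  simp [List.getD_eq_getElem?_getD, h]

theorem solution_take (n : Nat) (s : List Int) (hn : n ≤ s.length) :
    solution (s.take n) = ((solLoop s n).1.take (solLoop s n).2).sum := by
  induction n using Nat.strong_induction_on generalizing s with
  | _ n ih =>
    by_cases h3 : 3 ≤ n
    · have hlen : (s.take n).length = n := by simp [hn]
      rw [solution, solLoop, if_pos h3, if_neg (by omega)]
      have c1 : ((s.take n).length : Int) - 1 = ((n - 1 : Nat) : Int) := by rw [hlen]; omega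
      have c2 : ((n - 1 : Nat) : Int) - 1 = ((n - 2 : Nat) : Int) := by omega
      have c3 : ((n - 1 : Nat) : Int) - 2 = ((n - 3 : Nat) : Int) := by omega
      simp only [c1, c2, c3, PySem.List.pyGetD_natCast, PySem.List.pySetD_natCast,
        PySem.List.slice_to_natCast]
      rw [getD_take_of_lt s n (n - 1) (by omega), getD_take_of_lt s n (n - 2) (by omega),
        getD_take_of_lt s n (n - 3) (by omega), ← List.take_set, List.take_take,
        Nat.min_eq_left (by omega)]
      exact ih (n - 2) (by omega) _ (by simp; omega)
    · rw [solLoop, if_neg h3, solution, if_pos (by simp; omega)]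

-- ===== VERDICT (by name: the statement is the Claim_ definition above) =====
theorem solution_spec : Claim_equal_solution := by
  intro steps _
  unfold Spec_solution solution_alt
  have := solution_take steps.length steps (le_refl _)
  simpa using this
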